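-- pv_equiv track=rewrite | github.com/bilal07karadeniz/Grafyx | grafyx/search/_relevance.py | _stem_match
-- ===== SOURCE A (Python) =====
-- def _stem_match(a: str, b: str) -> bool:
--     if not a or not b:
--         return False
--     shorter, longer = (a, b) if len(a) <= len(b) else (b, a)
--     if len(shorter) < 4:
--         return False
--     if longer.startswith(shorter):
--         return True
--     min_prefix = max(4, len(shorter) - 1)
--     if min_prefix <= len(longer) and longer[:min_prefix] == shorter[:min_prefix]:
--         return True
--     if len(shorter) >= 7 and len(longer) >= 7:
--         shared = 0
--         for c1, c2 in zip(shorter, longer):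
--             if c1 == c2:
--                 shared += 1
--             else:
--                 break
--         if shared >= 5:
--             return True
--     return False
-- ===== SOURCE B (Python) =====
-- def _stem_match(a: str, b: str) -> bool:
--     if not a or not b:
--         return False
--     if len(a) <= len(b):
--         shorter, longer = a, b
--     else:
--         shorter, longer = b, a
--     if len(shorter) < 4:
--         return False
--     cp = 0
--     for c1, c2 in zip(shorter, longer):
--         if c1 != c2:
--             break
--         cp += 1
--     return cp >= max(4, len(shorter) - 1) or (
--         len(shorter) >= 7 and len(longer) >= 7 and cp >= 5
--     )
-- ===== Notes on version B (the rewrite author's own statement) =====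
-- stated objective: simpler
-- what changed: Replaces A's three separate matching branches (startswith, slice-prefix equality with a redundant length guard, and a conditional zip loop) by a single common-prefix-length scan followed by two arithmetic threshold checks.
import Mathlib
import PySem

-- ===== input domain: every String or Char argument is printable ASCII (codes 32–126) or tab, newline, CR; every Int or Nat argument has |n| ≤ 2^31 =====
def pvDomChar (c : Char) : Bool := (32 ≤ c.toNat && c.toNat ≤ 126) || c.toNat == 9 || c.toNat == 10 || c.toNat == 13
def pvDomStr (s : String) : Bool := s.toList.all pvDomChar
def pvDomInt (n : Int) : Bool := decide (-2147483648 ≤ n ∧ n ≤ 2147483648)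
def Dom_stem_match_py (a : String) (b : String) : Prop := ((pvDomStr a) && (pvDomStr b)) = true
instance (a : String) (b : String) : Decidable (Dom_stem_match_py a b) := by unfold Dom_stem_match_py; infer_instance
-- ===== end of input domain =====

-- B replaces A's startswith / slice-equality / conditional-zip branches by one common-prefix-length
-- scan followed by arithmetic threshold checks (objective: simpler; same return value everywhere).

-- ===== PORT A =====
-- the 'for c1, c2 in zip(...): if c1 == c2: shared += 1 else: break' loop of A
def pvSharedLoopA : List (Char × Char) → Nat → Nat
  | [], shared => shared
  | (c1, c2) :: rest, shared => if c1 = c2 then pvSharedLoopA rest (shared + 1) else shared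

def stem_match_py (a : String) (b : String) : Bool :=
  let la := a.toList
  let lb := b.toList
  if la.length = 0 ∨ lb.length = 0 then false
  else
    let p := if la.length ≤ lb.length then (la, lb) else (lb, la)
    let shorter := p.1
    let longer := p.2
    if shorter.length < 4 then false
    else if PySem.Chars.startswith longer shorter then true
    else
      let min_prefix : Int := max 4 ((shorter.length : Int) - 1)
      if min_prefix ≤ (longer.length : Int) ∧
          PySem.List.slice longer none (some min_prefix) =
            PySem.List.slice shorter none (some min_prefix) then true
      else if 7 ≤ shorter.length ∧ 7 ≤ longer.length then
        let shared := pvSharedLoopA (shorter.zip longer) 0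
        if 5 ≤ shared then true else false
      else false

-- ===== PORT B =====
-- one left-to-right scan: number of leading equal characters (B's cp loop)
def pvCommonPrefixLen : List Char → List Char → Nat
  | c1 :: t1, c2 :: t2 => if c1 = c2 then pvCommonPrefixLen t1 t2 + 1 else 0
  | _, _ => 0

def stem_match_py_alt (a : String) (b : String) : Bool :=
  let la := a.toList
  let lb := b.toList
  if la.isEmpty || lb.isEmpty then false
  else
    let (shorter, longer) := if la.length ≤ lb.length then (la, lb) else (lb, la)
    if shorter.length < 4 then false
    else
      let cp := pvCommonPrefixLen shorter longer
      decide (max 4 (shorter.length - 1) ≤ cp) ||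
        (decide (7 ≤ shorter.length) && decide (7 ≤ longer.length) && decide (5 ≤ cp))

-- ===== PRECONDITION & SPEC =====
def Spec_stem_match_py (a : String) (b : String) (out : Bool) : Prop := out = stem_match_py_alt a b
instance (a : String) (b : String) (out : Bool) : Decidable (Spec_stem_match_py a b out) := by unfold Spec_stem_match_py; infer_instance

-- ===== CLAIM (what is proved, stated in full; the proofs are below) =====
def Claim_equal_stem_match_py : Prop := ∀ (a : String) (b : String), Dom_stem_match_py a b → Spec_stem_match_py a b (stem_match_py a b)

-- ===== LEMMAS AND PROOFS =====

theorem pvCommonPrefixLen_le (s l : List Char) : pvCommonPrefixLen s l ≤ s.length := by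
  induction s generalizing l with
  | nil => simp [pvCommonPrefixLen]
  | cons c t ih =>
    cases l with
    | nil => simp [pvCommonPrefixLen]
    | cons d u =>
      by_cases h : c = d <;> simp [pvCommonPrefixLen, h]
      exact ih u

theorem pvSharedLoopA_eq (s l : List Char) (acc : Nat) :
    pvSharedLoopA (s.zip l) acc = acc + pvCommonPrefixLen s l := by
  induction s generalizing l acc with
  | nil => simp [pvSharedLoopA, pvCommonPrefixLen]
  | cons c t ih =>
    cases l with
    | nil => simp [pvSharedLoopA, pvCommonPrefixLen]
    | cons d u =>
      by_cases h : c = d <;> simp [pvSharedLoopA, pvCommonPrefixLen, h]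
      rw [ih]
      omega

theorem take_eq_iff_cp (s l : List Char) (k : Nat) (hk : k ≤ s.length) (hsl : s.length ≤ l.length) :
    l.take k = s.take k ↔ k ≤ pvCommonPrefixLen s l := by
  induction k generalizing s l with
  | zero => simp
  | succ k ih =>
    cases s with
    | nil => simp at hk
    | cons c t =>
      cases l with
      | nil => simp at hsl
      | cons d u =>
        by_cases h : c = d
        · subst h
          rw [show pvCommonPrefixLen (c :: t) (c :: u) = pvCommonPrefixLen t u + 1 from by
            simp [pvCommonPrefixLen]]
          simp only [List.take_succ_cons, List.cons.injEq, true_and]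
          rw [ih t u (by simpa using hk) (by simpa using hsl)]
          omega
        · simp only [List.take_succ_cons, pvCommonPrefixLen, if_neg h]
          constructor
          · intro he; exact absurd (List.cons.inj he).1 (Ne.symm h)
          · omega

theorem startswith_iff_cp (s l : List Char) (hsl : s.length ≤ l.length) :
    PySem.Chars.startswith l s = true ↔ s.length ≤ pvCommonPrefixLen s l := by
  rw [PySem.Chars.startswith_iff]
  constructor
  · intro hp
    rw [← take_eq_iff_cp s l s.length le_rfl hsl]
    obtain ⟨t, rfl⟩ := hp
    simp
  · intro hc
    have := (take_eq_iff_cp s l s.length le_rfl hsl).mpr hc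
    rw [List.take_of_length_le le_rfl] at this
    exact ⟨l.drop s.length, by rw [← this]; simp [Nat.min_eq_left hsl]⟩

-- the core equality on the (shorter, longer) list pair
theorem core_eq (s l : List Char) (hsl : s.length ≤ l.length) (h4 : ¬ s.length < 4) :
    (if PySem.Chars.startswith l s then true
     else
       let min_prefix : Int := max 4 ((s.length : Int) - 1)
       if min_prefix ≤ (l.length : Int) ∧
           PySem.List.slice l none (some min_prefix) = PySem.List.slice s none (some min_prefix) then true
       else if 7 ≤ s.length ∧ 7 ≤ l.length then
         if 5 ≤ pvSharedLoopA (s.zip l) 0 then true else false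
       else false)
    = (let cp := pvCommonPrefixLen s l
       decide (max 4 (s.length - 1) ≤ cp) ||
         (decide (7 ≤ s.length) && decide (7 ≤ l.length) && decide (5 ≤ cp))) := by
  have hcp := pvCommonPrefixLen_le s l
  set cp := pvCommonPrefixLen s l with hcpdef
  have hmpN : (max 4 ((s.length : Int) - 1)).toNat = max 4 (s.length - 1) := by omega
  have hmp0 : (0 : Int) ≤ max 4 ((s.length : Int) - 1) := by omega
  have hslice : PySem.List.slice l none (some (max 4 ((s.length : Int) - 1))) =
      PySem.List.slice s none (some (max 4 ((s.length : Int) - 1))) ↔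
      max 4 (s.length - 1) ≤ cp := by
    rw [PySem.List.slice_to _ hmp0, PySem.List.slice_to _ hmp0, hmpN]
    exact take_eq_iff_cp s l (max 4 (s.length - 1)) (by omega) hsl
  by_cases hsw : PySem.Chars.startswith l s
  · rw [if_pos hsw]
    have : s.length ≤ cp := (startswith_iff_cp s l hsl).mp hsw
    have : max 4 (s.length - 1) ≤ cp := by omega
    simp [this]
  · rw [if_neg hsw]
    have hlt : cp < s.length := by
      rcases lt_or_ge cp s.length with h | h
      · exact h
      · exact absurd ((startswith_iff_cp s l hsl).mpr h) hsw
    simp only []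
    by_cases hb2 : max 4 (s.length - 1) ≤ cp
    · rw [if_pos ⟨by omega, hslice.mpr hb2⟩]
      simp [hb2]
    · rw [if_neg (by intro h; exact hb2 (hslice.mp h.2))]
      simp only [hb2, decide_false, Bool.false_or]
      by_cases h7 : 7 ≤ s.length ∧ 7 ≤ l.length
      · rw [if_pos h7, pvSharedLoopA_eq, Nat.zero_add, ← hcpdef]
        by_cases h5 : 5 ≤ cp <;> simp [h5, h7.1, h7.2]
      · rw [if_neg h7]
        rcases not_and_or.mp h7 with h | h <;> simp [h]

-- ===== VERDICT (by name: the statement is the Claim_ definition above) =====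

theorem stem_match_py_spec : Claim_equal_stem_match_py := by
  intro a b _
  unfold Spec_stem_match_py stem_match_py stem_match_py_alt
  set la := a.toList
  set lb := b.toList
  by_cases he : la.length = 0 ∨ lb.length = 0
  · have h1 : (la.isEmpty || lb.isEmpty) = true := by
      rcases he with h | h <;>
        simp [List.length_eq_zero_iff.mp h]
    simp only [if_pos he, h1, if_true]
  · have hne : la ≠ [] ∧ lb ≠ [] := by
      constructor <;> intro h <;> exact he (by simp [h])
    have h1 : (la.isEmpty || lb.isEmpty) = false := by
      simp [hne.1, hne.2]
    rw [if_neg he]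
    simp only [h1, Bool.false_eq_true, if_false]
    by_cases hord : la.length ≤ lb.length
    · simp only [if_pos hord]
      by_cases h4 : la.length < 4
      · simp [h4]
      · rw [if_neg h4, if_neg h4]
        exact core_eq la lb hord h4
    · simp only [if_neg hord]
      by_cases h4 : lb.length < 4
      · simp [h4]
      · rw [if_neg h4, if_neg h4]
        exact core_eq lb la (by omega) h4
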